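-- pv_equiv track=rewrite | github.com/mebeim/ctf-challenges | challenges/bigmistake/expl.py | to_bigint
-- ===== SOURCE A (Python) =====
-- def to_bigint(data: list[int]) -> int:
-- 	value = 0
-- 	shift = 0
--
-- 	for v in data:
-- 		# Top nibble will be lost
-- 		assert v < (1 << 60)
-- 		value |= v << shift
-- 		shift += 60
--
-- 	return value
-- ===== SOURCE B (Python) =====
-- def to_bigint(data: list[int]) -> int:
-- 	# Divide and conquer: OR together the two halves, with the upper half
-- 	# shifted up by 60 bits per element of the lower half. Exact because
-- 	# | is associative and << distributes over it.
-- 	if not data: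
-- 		return 0
-- 	if len(data) == 1:
-- 		v = data[0]
-- 		# Top nibble would be lost
-- 		assert v < (1 << 60)
-- 		return v
-- 	mid = len(data) // 2
-- 	return to_bigint(data[:mid]) | (to_bigint(data[mid:]) << (60 * mid))
-- ===== Notes on version B (the rewrite author's own statement) =====
-- stated objective: faster
-- what changed: Replaced the left-to-right fold that ORs each 60-bit chunk into one ever-growing accumulator by a divide-and-conquer recursion that combines the two halves with a single shift-and-OR, cutting total big-int work from quadratic to near-linear word operations.
import Mathlib
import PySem

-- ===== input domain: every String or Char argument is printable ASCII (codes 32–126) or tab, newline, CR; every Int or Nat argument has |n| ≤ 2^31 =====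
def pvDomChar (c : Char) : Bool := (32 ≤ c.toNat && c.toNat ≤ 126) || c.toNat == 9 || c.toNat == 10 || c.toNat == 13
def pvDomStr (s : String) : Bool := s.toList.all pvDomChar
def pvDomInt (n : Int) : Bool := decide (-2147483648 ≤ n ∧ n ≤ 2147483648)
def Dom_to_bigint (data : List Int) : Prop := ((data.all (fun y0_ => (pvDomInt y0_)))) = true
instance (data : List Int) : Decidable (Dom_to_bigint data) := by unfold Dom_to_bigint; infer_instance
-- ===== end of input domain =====

-- B replaces A's quadratic fold by divide-and-conquer shift-and-OR combining of halves (faster).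
-- Python's `assert v < (1 << 60)` always passes on Dom (|v| ≤ 2^31), so it is not modelled.

-- ===== PORT A =====
-- value |= v << shift; shift += 60, left to right
def to_bigint (data : List Int) : Int :=
  (data.foldl (fun (st : Int × Nat) (v : Int) => (PySem.Int.bor st.1 (v <<< st.2), st.2 + 60)) (0, 0)).1

-- ===== PORT B =====
def to_bigint_alt : List Int → Int
  | [] => 0
  | [v] => v
  | v1 :: v2 :: rest =>
    let d := v1 :: v2 :: rest
    let mid := d.length / 2
    PySem.Int.bor (to_bigint_alt (d.take mid)) (to_bigint_alt (d.drop mid) <<< (60 * mid))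
termination_by d => d.length
decreasing_by
  · simp; omega
  · simp; omega

-- ===== PRECONDITION & SPEC =====
def Spec_to_bigint (data : List Int) (out : Int) : Prop := out = to_bigint_alt data
instance (data : List Int) (out : Int) : Decidable (Spec_to_bigint data out) := by unfold Spec_to_bigint; infer_instance

-- ===== CLAIM (what is proved, stated in full; the proofs are below) =====
def Claim_equal_to_bigint : Prop := ∀ (data : List Int), Dom_to_bigint data → Spec_to_bigint data (to_bigint data)

-- ===== LEMMAS AND PROOFS =====

-- n - (n &&& m) removes from n exactly the bits it shares with m
theorem pv_ldiff_add_and : ∀ (n m : Nat), Nat.ldiff n m + (n &&& m) = n := by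
  intro n
  induction n using Nat.binaryRec with
  | zero => intro m; simp [Nat.ldiff]
  | bit b n IH =>
    intro m
    cases m using Nat.bitCasesOn with
    | _ c m' =>
      rw [Nat.ldiff_bit, Nat.land_bit, Nat.bit_val, Nat.bit_val, Nat.bit_val]
      have := IH m'
      cases b <;> cases c <;> simp <;> omega

theorem pv_sub_and (n m : Nat) : n - (n &&& m) = Nat.ldiff n m := by
  have := pv_ldiff_add_and n m; omega

-- bit k of a, under Python's infinite two's-complement reading
def pvTb (a : Int) (k : Nat) : Bool :=
  if 0 ≤ a then a.toNat.testBit k else !((-a - 1).toNat.testBit k)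

theorem pvTb_ext {a b : Int} (h : ∀ k, pvTb a k = pvTb b k) : a = b := by
  by_cases ha : 0 ≤ a <;> by_cases hb : 0 ≤ b
  · have : a.toNat = b.toNat := by
      apply Nat.eq_of_testBit_eq; intro k
      have := h k; simpa [pvTb, ha, hb] using this
    omega
  · exfalso
    set k := a.toNat + (-b - 1).toNat with hk
    have h1 : a.toNat.testBit k = false :=
      Nat.testBit_eq_false_of_lt (lt_of_lt_of_le (Nat.lt_two_pow_self) (Nat.pow_le_pow_right (by norm_num) (by omega)))
    have h2 : (-b - 1).toNat.testBit k = false :=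
      Nat.testBit_eq_false_of_lt (lt_of_lt_of_le (Nat.lt_two_pow_self) (Nat.pow_le_pow_right (by norm_num) (by omega)))
    have := h k; simp [pvTb, ha, hb, h1] at this
    rw [show ((-b).toNat - 1) = (-b - 1).toNat from by omega, h2] at this
    simp at this
  · exfalso
    set k := b.toNat + (-a - 1).toNat with hk
    have h1 : b.toNat.testBit k = false :=
      Nat.testBit_eq_false_of_lt (lt_of_lt_of_le (Nat.lt_two_pow_self) (Nat.pow_le_pow_right (by norm_num) (by omega)))
    have h2 : (-a - 1).toNat.testBit k = false :=
      Nat.testBit_eq_false_of_lt (lt_of_lt_of_le (Nat.lt_two_pow_self) (Nat.pow_le_pow_right (by norm_num) (by omega)))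
    have := h k; simp [pvTb, ha, hb, h1] at this
    rw [show ((-a).toNat - 1) = (-a - 1).toNat from by omega, h2] at this
    simp at this
  · have : (-a - 1).toNat = (-b - 1).toNat := by
      apply Nat.eq_of_testBit_eq; intro k
      have := h k; simpa [pvTb, ha, hb] using this
    omega

theorem pvTb_bor (a b : Int) (k : Nat) :
    pvTb (PySem.Int.bor a b) k = (pvTb a k || pvTb b k) := by
  unfold PySem.Int.bor pvTb
  by_cases ha : 0 ≤ a <;> by_cases hb : 0 ≤ b
  · rw [if_pos ha, if_pos hb, if_pos ha, if_pos hb,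
      if_pos (show (0:Int) ≤ ((a.toNat ||| b.toNat : Nat) : Int) from Int.natCast_nonneg _),
      Int.toNat_natCast, Nat.testBit_or]
  · rw [if_pos ha, if_neg hb, if_pos ha, if_neg hb,
      if_neg (show ¬ (0:Int) ≤ -(((-b - 1).toNat - ((-b - 1).toNat &&& a.toNat) : Nat) : Int) - 1 from by
        have := Int.natCast_nonneg ((-b - 1).toNat - ((-b - 1).toNat &&& a.toNat)); omega),
      show (-(-(((-b - 1).toNat - ((-b - 1).toNat &&& a.toNat) : Nat) : Int) - 1) - 1)
        = (((-b - 1).toNat - ((-b - 1).toNat &&& a.toNat) : Nat) : Int) from by ring,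
      Int.toNat_natCast, pv_sub_and, Nat.testBit_ldiff]
    cases a.toNat.testBit k <;> cases (-b - 1).toNat.testBit k <;> rfl
  · rw [if_neg ha, if_pos hb, if_neg ha, if_pos hb,
      if_neg (show ¬ (0:Int) ≤ -(((-a - 1).toNat - ((-a - 1).toNat &&& b.toNat) : Nat) : Int) - 1 from by
        have := Int.natCast_nonneg ((-a - 1).toNat - ((-a - 1).toNat &&& b.toNat)); omega),
      show (-(-(((-a - 1).toNat - ((-a - 1).toNat &&& b.toNat) : Nat) : Int) - 1) - 1)
        = (((-a - 1).toNat - ((-a - 1).toNat &&& b.toNat) : Nat) : Int) from by ring,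
      Int.toNat_natCast, pv_sub_and, Nat.testBit_ldiff]
    cases b.toNat.testBit k <;> cases (-a - 1).toNat.testBit k <;> rfl
  · rw [if_neg ha, if_neg hb, if_neg ha, if_neg hb,
      if_neg (show ¬ (0:Int) ≤ -((((-a - 1).toNat &&& (-b - 1).toNat) : Nat) : Int) - 1 from by
        have := Int.natCast_nonneg ((-a - 1).toNat &&& (-b - 1).toNat); omega),
      show (-(-((((-a - 1).toNat &&& (-b - 1).toNat) : Nat) : Int) - 1) - 1)
        = ((((-a - 1).toNat &&& (-b - 1).toNat) : Nat) : Int) from by ring,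
      Int.toNat_natCast, Nat.testBit_and]
    cases (-a - 1).toNat.testBit k <;> cases (-b - 1).toNat.testBit k <;> rfl

-- bits of m * 2^n + (2^n - 1): n low ones, then the bits of m
theorem pv_testBit_hi (m : Nat) : ∀ (n k : Nat),
    (m * 2 ^ n + (2 ^ n - 1)).testBit k = if k < n then true else m.testBit (k - n) := by
  intro n
  induction n with
  | zero => intro k; simp
  | succ n IH =>
    intro k
    have hx : m * 2 ^ (n + 1) + (2 ^ (n + 1) - 1) = 2 * (m * 2 ^ n + (2 ^ n - 1)) + 1 := by
      have : 0 < 2 ^ n := Nat.two_pow_pos n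
      ring_nf; omega
    rw [hx]
    cases k with
    | zero => simp [Nat.testBit_zero]
    | succ k =>
      rw [Nat.testBit_add_one, show (2 * (m * 2 ^ n + (2 ^ n - 1)) + 1) / 2 = m * 2 ^ n + (2 ^ n - 1) from by omega, IH k]
      by_cases h : k < n
      · rw [if_pos h, if_pos (by omega)]
      · rw [if_neg h, if_neg (by omega), show k + 1 - (n + 1) = k - n from by omega]

theorem pvTb_shift (a : Int) (n k : Nat) :
    pvTb (a <<< n) k = if k < n then false else pvTb a (k - n) := by
  rw [Int.shiftLeft_eq]
  by_cases ha : 0 ≤ a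
  · have h1 : (0:Int) ≤ a * 2 ^ n := by positivity
    have h2 : (a * 2 ^ n).toNat = a.toNat * 2 ^ n := by
      have : a * 2 ^ n = ((a.toNat * 2 ^ n : Nat) : Int) := by
        push_cast
        rw [Int.toNat_of_nonneg ha]
      rw [this, Int.toNat_natCast]
    unfold pvTb
    rw [if_pos h1, if_pos ha, h2, ← Nat.shiftLeft_eq, Nat.testBit_shiftLeft]
    by_cases h : k < n
    · rw [if_pos h]; simp [Nat.not_le.mpr h]
    · rw [if_neg h]; simp [Nat.le_of_not_lt h]
  · have hneg : a * 2 ^ n < 0 := by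
      exact mul_neg_of_neg_of_pos (by omega) (pow_pos (by norm_num : (0:Int) < 2) n)
    have hval : (-(a * 2 ^ n) - 1).toNat = (-a - 1).toNat * 2 ^ n + (2 ^ n - 1) := by
      have hna : (0:Int) ≤ -a - 1 := by omega
      have hcast : -(a * 2 ^ n) - 1 = (((-a - 1).toNat * 2 ^ n + (2 ^ n - 1) : Nat) : Int) := by
        push_cast [Nat.one_le_two_pow]
        rw [Int.toNat_of_nonneg hna]
        ring
      rw [hcast, Int.toNat_natCast]
    unfold pvTb
    rw [if_neg (by omega), if_neg ha, hval, pv_testBit_hi]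
    by_cases h : k < n
    · rw [if_pos h, if_pos h]; rfl
    · rw [if_neg h, if_neg h]

theorem pv_bor_assoc (a b c : Int) :
    PySem.Int.bor (PySem.Int.bor a b) c = PySem.Int.bor a (PySem.Int.bor b c) := by
  apply pvTb_ext; intro k; simp [pvTb_bor, Bool.or_assoc]

theorem pv_shift_bor (a b : Int) (n : Nat) :
    (PySem.Int.bor a b) <<< n = PySem.Int.bor (a <<< n) (b <<< n) := by
  apply pvTb_ext; intro k; simp [pvTb_bor, pvTb_shift, Bool.and_or_distrib_left]

-- linear specification both ports meet
def pvSpec : List Int → Int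
  | [] => 0
  | v :: t => PySem.Int.bor v (pvSpec t <<< (60 : Nat))

theorem pv_fold_spec : ∀ (data : List Int) (value : Int) (shift : Nat),
    (data.foldl (fun (st : Int × Nat) (v : Int) => (PySem.Int.bor st.1 (v <<< st.2), st.2 + 60)) (value, shift)).1
      = PySem.Int.bor value (pvSpec data <<< shift) := by
  intro data value shift
  induction data generalizing value shift with
  | nil => simp [pvSpec, Int.shiftLeft_eq, PySem.Int.bor_zero]
  | cons v t IH =>
    simp only [List.foldl, pvSpec]
    rw [IH, pv_shift_bor, ← Int.shiftLeft_add, pv_bor_assoc, Nat.add_comm 60 shift]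

theorem pv_spec_append (l r : List Int) :
    pvSpec (l ++ r) = PySem.Int.bor (pvSpec l) (pvSpec r <<< (60 * l.length)) := by
  induction l with
  | nil =>
    simp only [List.nil_append, pvSpec, List.length_nil, Nat.mul_zero]
    rw [PySem.Int.bor_comm, PySem.Int.bor_zero, Int.shiftLeft_eq]
    simp
  | cons v l IH =>
    simp only [List.cons_append, pvSpec, List.length_cons]
    rw [IH, pv_shift_bor, ← Int.shiftLeft_add, ← pv_bor_assoc]
    have : 60 * l.length + 60 = 60 * (l.length + 1) := by omega
    rw [this]

theorem pv_alt_spec : ∀ (data : List Int), to_bigint_alt data = pvSpec data := by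
  intro data
  induction data using to_bigint_alt.induct with
  | case1 => simp [to_bigint_alt, pvSpec]
  | case2 v =>
    simp [to_bigint_alt, pvSpec, Int.shiftLeft_eq, PySem.Int.bor_zero]
  | case3 v1 v2 rest d mid IH1 IH2 =>
    rw [to_bigint_alt, IH1, IH2]
    have hlen : ((v1 :: v2 :: rest).take ((v1 :: v2 :: rest).length / 2)).length
        = (v1 :: v2 :: rest).length / 2 := by
      simp; omega
    have h := pv_spec_append ((v1 :: v2 :: rest).take ((v1 :: v2 :: rest).length / 2))
      ((v1 :: v2 :: rest).drop ((v1 :: v2 :: rest).length / 2))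
    rw [List.take_append_drop, hlen] at h
    rw [← h]

-- ===== VERDICT (by name: the statement is the Claim_ definition above) =====
theorem to_bigint_spec : Claim_equal_to_bigint := by
  intro data _
  unfold Spec_to_bigint to_bigint
  rw [pv_fold_spec, pv_alt_spec]
  simp [PySem.Int.bor_comm (0 : Int), PySem.Int.bor_zero]
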